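-- pv_equiv track=rewrite | github.com/s-oshmyaga/calculator | app/logics.py | to_factorial
-- ===== SOURCE A (Python) =====
-- def to_factorial(equation):
--     if equation.isdigit():
--         equation = 'math.factorial(' + equation + ')'
--     else:
--         for sign in range(len(equation) - 2, -1, -1):
--             if not equation[sign].isdigit():
--                 equation = equation[:sign + 1] + 'math.factorial(' + equation[sign + 1:] + ')'
--     return equation
-- ===== SOURCE B (Python) =====
-- def to_factorial(equation):
--     # Single left-to-right pass (O(n)) instead of A's repeated right-to-left slicing (O(n^2)).
--     if equation.isdigit():
--         return 'math.factorial(' + equation + ')'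
--     pieces = []
--     closes = 0
--     for ch, _nxt in zip(equation, equation[1:]):  # every char except the last
--         pieces.append(ch)
--         if not ch.isdigit():
--             pieces.append('math.factorial(')
--             closes += 1
--     pieces.append(equation[-1:])  # last char ('' when equation is empty)
--     return ''.join(pieces) + ')' * closes
-- ===== Notes on version B (the rewrite author's own statement) =====
-- stated objective: faster
-- what changed: A repeatedly re-slices the whole growing string while scanning right-to-left (quadratic); B makes one left-to-right pass appending 'math.factorial(' after each non-final non-digit character and adds the matching count of ')' at the end.
import Mathlib
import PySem

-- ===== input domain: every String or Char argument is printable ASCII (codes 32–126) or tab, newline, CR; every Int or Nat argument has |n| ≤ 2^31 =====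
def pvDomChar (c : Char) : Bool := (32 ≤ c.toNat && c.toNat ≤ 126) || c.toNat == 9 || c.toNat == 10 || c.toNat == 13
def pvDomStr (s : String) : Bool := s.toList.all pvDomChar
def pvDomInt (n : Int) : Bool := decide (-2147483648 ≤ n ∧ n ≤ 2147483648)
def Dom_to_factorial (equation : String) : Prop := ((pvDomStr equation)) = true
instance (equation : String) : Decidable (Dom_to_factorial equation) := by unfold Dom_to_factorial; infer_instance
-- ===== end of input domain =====

-- B replaces A's right-to-left loop of string slicings with one left-to-right pass
-- appending 'math.factorial(' after each non-final non-digit char and the matching ')'s at the end (objective: faster).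

-- ===== PORT A =====
-- the literal 'math.factorial(' (shared string constant of both Pythons)
def pvFact : List Char := "math.factorial(".toList

-- loop body of A: equation[sign] via pyGet? (always in range when Python reaches it;
-- the none branch is unreachable and leaves the state unchanged), slices via PySem.List.slice
def pvStepA (e : List Char) (sign : Int) : List Char :=
  match PySem.List.pyGet? e sign with
  | some c =>
      if !(PySem.Chars.isdigit c) then
        PySem.List.slice e none (some (sign + 1)) ++ pvFact ++
          PySem.List.slice e (some (sign + 1)) none ++ [')']
      else e
  | none => e

def to_factorial (equation : String) : String :=
  if PySem.Str.strIsdigit equation then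
    String.ofList (pvFact ++ equation.toList ++ [')'])
  else
    String.ofList
      ((PySem.List.pyRange ((equation.toList.length : Int) - 2) (-1) (-1)).foldl
        pvStepA equation.toList)

-- ===== PORT B =====
-- Source B's zip(equation, equation[1:]) loop = structural recursion consuming one char
-- while at least one more remains; the last char is appended as is
def pvPieces : List Char → List Char
  | [] => []
  | [c] => [c]
  | c :: d :: rest =>
      if PySem.Chars.isdigit c then c :: pvPieces (d :: rest)
      else c :: (pvFact ++ pvPieces (d :: rest))

def pvCloses : List Char → Nat
  | [] => 0
  | [_] => 0
  | c :: d :: rest => (if PySem.Chars.isdigit c then 0 else 1) + pvCloses (d :: rest)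

def to_factorial_alt (equation : String) : String :=
  if PySem.Str.strIsdigit equation then
    String.ofList (pvFact ++ equation.toList ++ [')'])
  else
    String.ofList (pvPieces equation.toList ++ List.replicate (pvCloses equation.toList) ')')

-- ===== PRECONDITION & SPEC =====
def Spec_to_factorial (equation : String) (out : String) : Prop := out = to_factorial_alt equation
instance (equation : String) (out : String) : Decidable (Spec_to_factorial equation out) := by unfold Spec_to_factorial; infer_instance

-- ===== CLAIM (what is proved, stated in full; the proofs are below) =====
def Claim_equal_to_factorial : Prop := ∀ (equation : String), Dom_to_factorial equation → Spec_to_factorial equation (to_factorial equation)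

-- ===== LEMMAS AND PROOFS =====

-- B's per-char expansion of a non-final char
def pvPF (c : Char) : List Char := if PySem.Chars.isdigit c then [c] else c :: pvFact

def pvND (c : Char) : Bool := !(PySem.Chars.isdigit c)

lemma pvPieces_eq (s : List Char) :
    pvPieces s = s.dropLast.flatMap pvPF ++ s.drop (s.length - 1) := by
  induction s with
  | nil => simp [pvPieces]
  | cons c t ih =>
    cases t with
    | nil => simp [pvPieces]
    | cons d rest =>
      simp only [pvPieces, ih, List.dropLast_cons₂, List.flatMap_cons, List.length_cons,
        Nat.add_sub_cancel, List.drop_succ_cons, pvPF]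
      split_ifs <;> simp

lemma pvCloses_eq (s : List Char) :
    pvCloses s = s.dropLast.countP pvND := by
  induction s with
  | nil => simp [pvCloses]
  | cons c t ih =>
    cases t with
    | nil => simp [pvCloses]
    | cons d rest =>
      by_cases h : PySem.Chars.isdigit c <;>
        simp [pvCloses, ih, List.dropLast_cons₂, pvND, h]
      omega

lemma pvStepA_at (s r : List Char) (k : Nat) (hk : k < s.length) :
    pvStepA (s.take (k + 1) ++ r) (k : Int)
      = if PySem.Chars.isdigit s[k] then s.take (k + 1) ++ r
        else s.take (k + 1) ++ pvFact ++ r ++ [')'] := by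
  have hlen : (s.take (k + 1)).length = k + 1 := by simp; omega
  have hget : (s.take (k + 1) ++ r)[k]? = some s[k] := by
    rw [List.getElem?_append_left (by omega), List.getElem?_take_of_lt (by omega)]
    exact List.getElem?_eq_getElem hk
  have hcast : ((k : Int) + 1) = ((k + 1 : Nat) : Int) := by push_cast; ring
  unfold pvStepA
  rw [PySem.List.pyGet?_natCast, hget, hcast, PySem.List.slice_to_natCast,
    PySem.List.slice_from_natCast, List.take_left' hlen, List.drop_left' hlen]
  by_cases h : PySem.Chars.isdigit s[k] <;> simp [h, List.append_assoc]

-- invariant of A's countdown loop: processing signs k-1 … 0 on state (s.take k ++ r)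
lemma pvLoopA (s : List Char) (k : Nat) (r : List Char) (hk : k ≤ s.length) :
    (PySem.List.pyRange ((k : Int) - 1) (-1) (-1)).foldl pvStepA (s.take k ++ r)
      = (s.take k).flatMap pvPF ++ r ++ List.replicate ((s.take k).countP pvND) ')' := by
  induction k generalizing r with
  | zero =>
    rw [PySem.List.pyRange_neg_one_eq_nil (by omega)]
    simp
  | succ k ih =>
    have hklt : k < s.length := by omega
    have h1 : ((k + 1 : Nat) : Int) - 1 = (k : Nat) := by push_cast; ring
    rw [h1, PySem.List.pyRange_neg_one_cons (by omega), List.foldl_cons,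
      pvStepA_at s r k hklt]
    have htake : s.take (k + 1) = s.take k ++ [s[k]'hklt] := by
      rw [List.take_add_one, List.getElem?_eq_getElem hklt]
      simp
    split_ifs with h
    · rw [htake]
      simp only [List.append_assoc]
      rw [ih ([s[k]'hklt] ++ r) (by omega), List.flatMap_append, List.countP_append]
      simp [pvPF, pvND, h, List.append_assoc]
    · rw [htake]
      simp only [List.append_assoc]
      rw [ih ([s[k]'hklt] ++ (pvFact ++ (r ++ [')']))) (by omega),
        List.flatMap_append, List.countP_append]
      simp [pvPF, pvND, h, List.append_assoc, List.replicate_succ]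

-- ===== VERDICT (by name: the statement is the Claim_ definition above) =====
theorem to_factorial_spec : Claim_equal_to_factorial := by
  intro equation _
  unfold Spec_to_factorial to_factorial to_factorial_alt
  rw [PySem.Str.strIsdigit_eq]
  by_cases hd : PySem.Chars.strIsdigit equation.toList = true
  · rw [if_pos hd, if_pos hd]
  · rw [if_neg hd, if_neg hd]
    apply congrArg String.ofList
    generalize equation.toList = s
    rcases Nat.eq_zero_or_pos s.length with hn | hn
    · have hnil : s = [] := List.eq_nil_of_length_eq_zero hn
      rw [hnil, PySem.List.pyRange_neg_one_eq_nil (by simp)]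
      simp [pvPieces, pvCloses]
    · have h2 : (s.length : Int) - 2 = ((s.length - 1 : Nat) : Int) - 1 := by
        push_cast [Nat.cast_sub hn]; ring
      have hsplit : s = s.take (s.length - 1) ++ s.drop (s.length - 1) :=
        (List.take_append_drop _ _).symm
      have hfold := pvLoopA s (s.length - 1) (s.drop (s.length - 1)) (by omega)
      rw [← hsplit] at hfold
      rw [h2, hfold, pvPieces_eq, pvCloses_eq, List.dropLast_eq_take]
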